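-- pv_equiv track=rewrite | github.com/981377660LMT/algorithm-study | 12_贪心算法/经典题/1121. 将数组分成几个递增序列.py | canDivideIntoSubsequences
-- ===== SOURCE A (Python) =====
-- from typing import List
--
-- def canDivideIntoSubsequences(nums: List[int], k: int) -> bool:
--     # 能不能把一个数组分成一个或多个长度为K的不相交的递增子序列，仅取决于出现次数最多的那个元素的出现次数
--     # 即每次分组时先从出现次数最多的元素取
--     pre = nums[0]
--     maxDup = 0
--     for num in nums:
--         if num == pre:
--             maxDup += 1
--         else:
--             pre = num
--             maxDup = 1
--         if maxDup * k > len(nums):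
--             return False
--     return True
-- ===== SOURCE B (Python) =====
-- from typing import List
--
-- def canDivideIntoSubsequences(nums: List[int], k: int) -> bool:
--     n = len(nums)
--     # indices (1-based positions) where a new maximal run of equal values starts
--     bounds = [i for i, (a, b) in enumerate(zip(nums, nums[1:]), 1) if a != b]
--     # gap between consecutive change points = length of each maximal run
--     gaps = [b - a for a, b in zip([0] + bounds, bounds + [n])]
--     return max(gaps) * k <= n
-- ===== Notes on version B (the rewrite author's own statement) =====
-- stated objective: alternative
-- what changed: Instead of A's stateful counter scan with early exit, B builds the list of run-boundary indices (positions where adjacent elements differ), turns consecutive boundary differences into run lengths via a zip of the shifted boundary list, and compares the max gap times k with n; B is total and returns True on the empty list where A raises.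
import Mathlib
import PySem

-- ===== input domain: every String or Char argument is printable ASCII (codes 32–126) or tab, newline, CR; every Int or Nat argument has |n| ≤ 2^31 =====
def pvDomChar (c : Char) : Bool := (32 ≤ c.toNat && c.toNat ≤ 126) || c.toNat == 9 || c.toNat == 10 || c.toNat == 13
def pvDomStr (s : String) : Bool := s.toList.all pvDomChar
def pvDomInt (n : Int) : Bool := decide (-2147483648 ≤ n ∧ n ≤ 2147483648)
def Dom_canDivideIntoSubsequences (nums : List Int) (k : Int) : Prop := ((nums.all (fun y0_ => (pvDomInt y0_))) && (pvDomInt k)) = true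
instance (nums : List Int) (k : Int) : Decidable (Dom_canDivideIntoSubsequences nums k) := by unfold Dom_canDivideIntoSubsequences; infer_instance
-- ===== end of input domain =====

-- B replaces A's stateful early-exit duplicate-counter scan by computing the run-boundary
-- index list, turning boundary differences into run lengths via shifted zips, and one final
-- max-gap comparison; objective: alternative, same O(n) cost; B returns True on [] where A raises.


-- ===== PORT A =====
-- the for-loop of A: state (pre, maxDup), early return False when maxDup*k > len(nums)
def pvLoopA (k len : Int) (pre maxDup : Int) : List Int → Bool
  | [] => true
  | num :: rest =>
    let pre' := if num = pre then pre else num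
    let d' := if num = pre then maxDup + 1 else 1
    if d' * k > len then false else pvLoopA k len pre' d' rest

def canDivideIntoSubsequences (nums : List Int) (k : Int) : Bool :=
  match PySem.List.pyGet? nums 0 with
  | none => false   -- nums[0] raises IndexError in Python; excluded by Pre_
  | some pre0 => pvLoopA k (Int.ofNat nums.length) pre0 0 nums

-- ===== PORT B =====
-- bounds = [i for i, (a, b) in enumerate(zip(nums, nums[1:]), 1) if a != b]
-- gaps   = [b - a for a, b in zip([0] + bounds, bounds + [n])]
-- return max(gaps) * k <= n
def canDivideIntoSubsequences_alt (nums : List Int) (k : Int) : Bool :=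
  let n : Int := Int.ofNat nums.length
  let bounds : List Int :=
    ((PySem.List.enumerate (nums.zip (PySem.List.slice nums (some 1) none)) 1).filter
      (fun p => decide (p.2.1 ≠ p.2.2))).map Prod.fst
  let gaps : List Int := (((0 : Int) :: bounds).zip (bounds ++ [n])).map (fun p => p.2 - p.1)
  match gaps with
  | [] => true   -- unreachable: gaps always has |bounds| + 1 ≥ 1 elements
  | g :: gs => decide ((gs.foldl max g) * k ≤ n)

-- ===== PRECONDITION & SPEC =====
-- Pre_ excludes only the empty list, on which A raises IndexError.
def Pre_canDivideIntoSubsequences (nums : List Int) (k : Int) : Prop := nums ≠ []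
instance (nums : List Int) (k : Int) : Decidable (Pre_canDivideIntoSubsequences nums k) := by unfold Pre_canDivideIntoSubsequences; infer_instance
def pvWitness_canDivideIntoSubsequences : List Int × Int := ([1, 1, 2], 1)

def Spec_canDivideIntoSubsequences (nums : List Int) (k : Int) (out : Bool) : Prop := out = canDivideIntoSubsequences_alt nums k
instance (nums : List Int) (k : Int) (out : Bool) : Decidable (Spec_canDivideIntoSubsequences nums k out) := by unfold Spec_canDivideIntoSubsequences; infer_instance

-- ===== CLAIM (what is proved, stated in full; the proofs are below) =====
def Claim_equal_canDivideIntoSubsequences : Prop := ∀ (nums : List Int) (k : Int), Dom_canDivideIntoSubsequences nums k → Pre_canDivideIntoSubsequences nums k → Spec_canDivideIntoSubsequences nums k (canDivideIntoSubsequences nums k)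

-- ===== LEMMAS AND PROOFS =====

-- proof-only description of the maximal-run lengths of prev :: l, current run count cnt
def pvRuns (prev cnt : Int) : List Int → List Int
  | [] => [cnt]
  | y :: ys => if y = prev then pvRuns prev (cnt + 1) ys else cnt :: pvRuns y 1 ys

-- proof-only change points: positions (counted from off) where the element differs from prev
def pvCp (off prev : Int) : List Int → List Int
  | [] => []
  | y :: ys => if y = prev then pvCp (off + 1) y ys else off :: pvCp (off + 1) y ys

-- proof-only consecutive differences with seed s
def pvDiffs (s : Int) : List Int → List Int
  | [] => []
  | b :: rest => (b - s) :: pvDiffs b rest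

-- bounds computed by B's comprehension = pvCp
theorem bounds_eq_cp : ∀ (xs : List Int) (x off : Int),
    ((PySem.List.enumerate ((x :: xs).zip xs) off).filter (fun p => decide (p.2.1 ≠ p.2.2))).map Prod.fst
      = pvCp off x xs := by
  intro xs
  induction xs with
  | nil => intro x off; simp [pvCp, PySem.List.enumerate_nil]
  | cons y ys ih =>
    intro x off
    simp only [List.zip_cons_cons, PySem.List.enumerate_cons, List.filter_cons, pvCp]
    by_cases h : y = x
    · subst h
      simp only [ne_eq, not_true_eq_false, decide_false, Bool.false_eq_true, if_false]
      exact ih y (off + 1)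
    · have hxy : (decide ¬ x = y) = true := decide_eq_true (by intro e; exact h e.symm)
      rw [if_neg h]
      simp only [ne_eq, hxy, if_true, List.map_cons]
      rw [ih y (off + 1)]

-- B's gaps zip/map = pvDiffs
theorem gaps_eq_diffs : ∀ (bs : List Int) (s e : Int),
    (((s :: bs).zip (bs ++ [e])).map (fun p => p.2 - p.1)) = pvDiffs s (bs ++ [e]) := by
  intro bs
  induction bs with
  | nil => intro s e; simp [pvDiffs]
  | cons b bs ih =>
    intro s e
    simp only [List.cons_append, List.zip_cons_cons, List.map_cons, pvDiffs]
    rw [ih b e]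

-- consecutive differences of change points (with sentinel end) are exactly the run lengths
theorem diffs_cp_eq_runs : ∀ (l : List Int) (prev off s : Int),
    pvDiffs s (pvCp off prev l ++ [off + Int.ofNat l.length]) = pvRuns prev (off - s) l := by
  intro l
  induction l with
  | nil => intro prev off s; simp [pvCp, pvDiffs, pvRuns]
  | cons y ys ih =>
    intro prev off s
    simp only [pvCp, pvRuns, List.length_cons]
    by_cases h : y = prev
    · simp only [if_pos h]
      have := ih y (off + 1) s
      rw [show off + Int.ofNat (ys.length + 1) = (off + 1) + Int.ofNat ys.length by simp only [Int.ofNat_eq_natCast]; push_cast; ring]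
      rw [this, h]
      congr 1
      ring
    · simp only [if_neg h, List.cons_append, pvDiffs]
      rw [show off + Int.ofNat (ys.length + 1) = (off + 1) + Int.ofNat ys.length by simp only [Int.ofNat_eq_natCast]; push_cast; ring]
      rw [ih y (off + 1) off]
      norm_num

theorem pvRuns_ne_nil : ∀ (ys : List Int) (cur cnt : Int), pvRuns cur cnt ys ≠ [] := by
  intro ys
  induction ys with
  | nil => intro cur cnt; simp [pvRuns]
  | cons y ys ih =>
    intro cur cnt
    simp only [pvRuns]
    split
    · exact ih cur (cnt + 1)
    · simp

theorem pvRuns_one_le : ∀ (ys : List Int) (cur cnt : Int), 1 ≤ cnt → ∀ m ∈ pvRuns cur cnt ys, 1 ≤ m := by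
  intro ys
  induction ys with
  | nil => intro cur cnt h m hm; simp [pvRuns] at hm; omega
  | cons y ys ih =>
    intro cur cnt h m hm
    simp only [pvRuns] at hm
    split at hm
    · exact ih cur (cnt + 1) (by omega) m hm
    · rcases List.mem_cons.mp hm with h1 | h1
      · omega
      · exact ih y 1 (by omega) m h1

-- the first run's final count is a member ≥ the starting count
theorem pvRuns_head_ge : ∀ (ys : List Int) (cur cnt : Int), ∃ m ∈ pvRuns cur cnt ys, cnt ≤ m := by
  intro ys
  induction ys with
  | nil => intro cur cnt; exact ⟨cnt, by simp [pvRuns]⟩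
  | cons y ys ih =>
    intro cur cnt
    simp only [pvRuns]
    split
    · obtain ⟨m, hm, hle⟩ := ih cur (cnt + 1)
      exact ⟨m, hm, by omega⟩
    · exact ⟨cnt, List.mem_cons_self .., le_refl _⟩

-- A's loop returns true iff every run length (continuing the current run with count d) fits
theorem pvLoopA_eq (k len : Int) (hlen : 0 ≤ len) :
    ∀ (rest : List Int) (pre d : Int), d * k ≤ len →
      pvLoopA k len pre d rest = decide (∀ m ∈ pvRuns pre d rest, m * k ≤ len) := by
  intro rest
  induction rest with
  | nil =>
    intro pre d hd
    simp [pvLoopA, pvRuns, hd]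
  | cons y ys ih =>
    intro pre d hd
    simp only [pvLoopA, pvRuns]
    by_cases hy : y = pre
    · simp only [if_pos hy]
      by_cases hgt : (d + 1) * k > len
      · have hkpos : 0 < k := by nlinarith
        simp only [if_pos hgt]
        obtain ⟨m, hm, hle⟩ := pvRuns_head_ge ys pre (d + 1)
        have hne : ¬ (∀ m ∈ pvRuns pre (d + 1) ys, m * k ≤ len) := by
          intro hall
          have := hall m hm
          nlinarith
        rw [decide_eq_false hne]
      · simp only [if_neg hgt]
        exact ih pre (d + 1) (by omega)
    · simp only [if_neg hy]
      by_cases hgt : 1 * k > len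
      · have hkpos : 0 < k := by nlinarith
        simp only [if_pos hgt]
        obtain ⟨m, hm, hle⟩ := pvRuns_head_ge ys y 1
        have hne : ¬ (∀ m ∈ d :: pvRuns y 1 ys, m * k ≤ len) := by
          intro hall
          have := hall m (List.mem_cons_of_mem _ hm)
          nlinarith
        rw [decide_eq_false hne]
      · simp only [if_neg hgt]
        rw [ih y 1 (by omega)]
        simp only [decide_eq_decide, List.forall_mem_cons]
        by_cases hall : ∀ m ∈ pvRuns y 1 ys, m * k ≤ len
        · exact iff_of_true hall ⟨hd, hall⟩
        · exact iff_of_false hall (fun h => hall h.2)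

-- foldl max: the result is a member of the seed-cons list and an upper bound
theorem foldl_max_mem : ∀ (rs : List Int) (r : Int), rs.foldl max r ∈ r :: rs := by
  intro rs
  induction rs with
  | nil => intro r; simp
  | cons a as ih =>
    intro r
    simp only [List.foldl]
    rcases List.mem_cons.mp (ih (max r a)) with h | h
    · rw [h]; rcases max_choice r a with h2 | h2 <;> rw [h2] <;> simp
    · simp [h]

theorem foldl_max_ub : ∀ (rs : List Int) (r m : Int), m ∈ r :: rs → m ≤ rs.foldl max r := by
  intro rs
  induction rs with
  | nil => intro r m hm; simp at hm; simp [hm]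
  | cons a as ih =>
    intro r m hm
    simp only [List.foldl]
    rcases List.mem_cons.mp hm with h | h
    · exact le_trans (le_max_left r a) (ih (max r a) _ (List.mem_cons_self ..)) |>.trans_eq' (by simp [h])
    · rcases List.mem_cons.mp h with h2 | h2
      · exact le_trans (le_max_right r a) (ih (max r a) _ (List.mem_cons_self ..)) |>.trans_eq' (by simp [h2])
      · exact ih (max r a) m (List.mem_cons_of_mem _ h2)

-- B's gaps list for x :: xs are exactly the run lengths
theorem alt_gaps (x : Int) (xs : List Int) :
    canDivideIntoSubsequences_alt (x :: xs) k =
      (match pvRuns x 1 xs with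
       | [] => true
       | g :: gs => decide ((gs.foldl max g) * k ≤ Int.ofNat (x :: xs).length)) := by
  unfold canDivideIntoSubsequences_alt
  rw [PySem.List.slice_from_one]
  simp only [List.tail_cons]
  rw [bounds_eq_cp xs x 1, gaps_eq_diffs]
  rw [show Int.ofNat (x :: xs).length = 1 + Int.ofNat xs.length by simp only [List.length_cons, Int.ofNat_eq_natCast]; push_cast; ring]
  rw [diffs_cp_eq_runs xs x 1 0]
  norm_num

-- ===== VERDICT (by name: the statement is the Claim_ definition above) =====
theorem canDivideIntoSubsequences_spec : Claim_equal_canDivideIntoSubsequences := by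
  intro nums k _ hpre
  unfold Spec_canDivideIntoSubsequences
  match nums with
  | [] => exact absurd rfl hpre
  | x :: xs =>
    rw [alt_gaps]
    have hget : PySem.List.pyGet? (x :: xs) 0 = some x := by
      simp [PySem.List.pyGet?, PySem.List.pyIdx?]
    simp only [canDivideIntoSubsequences, hget]
    set len : Int := Int.ofNat (x :: xs).length with hlendef
    have hlen1 : (1 : Int) ≤ len := by
      rw [hlendef]; simp only [Int.ofNat_eq_natCast, List.length_cons]; omega
    -- unfold one step of A's loop: first element equals pre, count becomes 1
    simp only [pvLoopA, if_true, one_mul, zero_add]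
    obtain ⟨r, rs, hruns⟩ : ∃ r rs, pvRuns x 1 xs = r :: rs := by
      cases h : pvRuns x 1 xs with
      | nil => exact absurd h (pvRuns_ne_nil xs x 1)
      | cons r rs => exact ⟨r, rs, rfl⟩
    rw [hruns]
    simp only
    have hmem : rs.foldl max r ∈ r :: rs := foldl_max_mem rs r
    have hub : ∀ m ∈ r :: rs, m ≤ rs.foldl max r := fun m hm => foldl_max_ub rs r m hm
    have hone : ∀ m ∈ r :: rs, 1 ≤ m := by
      rw [← hruns]; exact pvRuns_one_le xs x 1 (by omega)
    have hmax1 : 1 ≤ rs.foldl max r := hone _ hmem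
    by_cases hk : k > len
    · have hkpos : 0 < k := by omega
      rw [if_pos hk]
      have : ¬ rs.foldl max r * k ≤ len := by nlinarith
      simp [this]
    · rw [if_neg hk]
      rw [pvLoopA_eq k len (by omega) xs x 1 (by omega), hruns]
      simp only [decide_eq_decide]
      constructor
      · intro hall
        exact hall _ hmem
      · intro hle m hm
        have h1 : 1 ≤ m := hone m hm
        have h2 : m ≤ rs.foldl max r := hub m hm
        by_cases hk0 : 0 ≤ k
        · nlinarith
        · nlinarith
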